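-- pv_equiv track=rewrite | github.com/Chazaster/CFG-Compression | huffman.py | buildTableRepair
-- ===== SOURCE A (Python) =====
-- def buildTableRepair(S, rules):
--     temp = []
--     for symbol in S:
--         temp.append(symbol)
--
--     for rule in rules:
--         for symbol in rule:
--             temp.append(symbol)
--
--     table = symbolTable(temp)
--     return table
--
-- def symbolTable(temp):
--     cleanedTemp = list(set(temp))
--     lower = []
--     upper = []
--     for i in cleanedTemp:
--         if i.islower():
--             lower.append(i)
--         else:
--             upper.append(i)
--     lower.sort()
--     upper.sort()
--     symbolTable = lower + upper
--     return symbolTable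
-- ===== SOURCE B (Python) =====
-- def buildTableRepair(S, rules):
--     symbols = set(S)
--     for rule in rules:
--         symbols.update(rule)
--     return sorted(symbols, key=lambda s: (not s.islower(), s))
-- ===== Notes on version B (the rewrite author's own statement) =====
-- stated objective: idiomatic
-- what changed: Replaces the build-a-list/partition-into-lower-upper/two-sorts-and-concatenate pipeline with accumulating a set directly and one keyed sort whose (not islower, s) key yields the same order.
import Mathlib
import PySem

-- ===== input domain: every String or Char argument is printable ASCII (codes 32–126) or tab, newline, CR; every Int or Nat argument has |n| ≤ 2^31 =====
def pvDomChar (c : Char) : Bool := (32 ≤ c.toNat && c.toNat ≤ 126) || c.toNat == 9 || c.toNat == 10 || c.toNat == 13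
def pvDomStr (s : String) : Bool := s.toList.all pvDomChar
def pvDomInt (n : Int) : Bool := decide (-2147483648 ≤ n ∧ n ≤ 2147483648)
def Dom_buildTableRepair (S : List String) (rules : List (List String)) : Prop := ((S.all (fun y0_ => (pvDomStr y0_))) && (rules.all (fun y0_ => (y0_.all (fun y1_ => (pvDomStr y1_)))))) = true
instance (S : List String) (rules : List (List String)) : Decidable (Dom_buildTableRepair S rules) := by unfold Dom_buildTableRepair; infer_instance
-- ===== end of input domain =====

-- B replaces A's list-building, lower/upper partition and two sorts by one keyed sort
-- over a set accumulated directly (objective: more idiomatic; return value only, no mutation).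

-- hand-ported str.islower(): at least one cased char and no uppercase one — exact on the
-- ASCII domain, where the cased characters are exactly a-z and A-Z (shared primitive of both ports)
def pyStrIslower (s : String) : Bool :=
  s.toList.any PySem.Chars.islower && !(s.toList.any PySem.Chars.isupper)

-- ===== PORT A =====
def symbolTablePort (temp : List String) : List String :=
  let cleanedTemp := PySem.Set.ofList temp
  let lu := cleanedTemp.foldl
    (fun (lu : List String × List String) i =>
      if pyStrIslower i then (lu.1 ++ [i], lu.2) else (lu.1, lu.2 ++ [i]))
    ([], [])
  PySem.List.sorted lu.1 (fun x => x) ++ PySem.List.sorted lu.2 (fun x => x)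

def buildTableRepair (S : List String) (rules : List (List String)) : List String :=
  let temp := S.foldl (fun acc symbol => acc ++ [symbol]) []
  let temp := rules.foldl
    (fun acc rule => rule.foldl (fun acc symbol => acc ++ [symbol]) acc) temp
  symbolTablePort temp

-- ===== PORT B =====
def buildTableRepair_alt (S : List String) (rules : List (List String)) : List String :=
  let symbols := rules.foldl (fun acc rule => PySem.Set.update acc rule) (PySem.Set.ofList S)
  PySem.List.sorted2 symbols (fun s => !pyStrIslower s) (fun s => s)

-- ===== PRECONDITION & SPEC =====
def Spec_buildTableRepair (S : List String) (rules : List (List String)) (out : List String) : Prop := out = buildTableRepair_alt S rules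
instance (S : List String) (rules : List (List String)) (out : List String) : Decidable (Spec_buildTableRepair S rules out) := by unfold Spec_buildTableRepair; infer_instance

-- ===== CLAIM (what is proved, stated in full; the proofs are below) =====
def Claim_equal_buildTableRepair : Prop := ∀ (S : List String) (rules : List (List String)), Dom_buildTableRepair S rules → Spec_buildTableRepair S rules (buildTableRepair S rules)

-- ===== LEMMAS AND PROOFS =====

-- sorted2 with keys into linear orders is sorted with the lexicographic key
theorem sorted2_eq_sorted_toLex {α κ₁ κ₂ : Type} [LinearOrder κ₁] [LinearOrder κ₂]
    (xs : List α) (k1 : α → κ₁) (k2 : α → κ₂) :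
    PySem.List.sorted2 xs k1 k2 = PySem.List.sorted xs (fun a => toLex (k1 a, k2 a)) := by
  have hbefore : (fun (a b : α) => decide (k1 a < k1 b) || (!decide (k1 b < k1 a) && decide (k2 a < k2 b)))
      = fun a b => decide (toLex (k1 a, k2 a) < toLex (k1 b, k2 b)) := by
    funext a b
    by_cases h1 : k1 a < k1 b
    · simp [h1, Prod.Lex.lt_iff]
    · by_cases h2 : k1 b < k1 a
      · have hne : ¬ k1 a = k1 b := fun h => absurd h2 (by simp [h])
        simp [h1, h2, Prod.Lex.lt_iff, hne]
      · have heq : k1 a = k1 b := le_antisymm (not_lt.mp h2) (not_lt.mp h1)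
        simp [Prod.Lex.lt_iff, heq]
  show List.foldl (fun acc x => PySem.List.insertBy
      (fun a b => decide (k1 a < k1 b) || (!decide (k1 b < k1 a) && decide (k2 a < k2 b))) x acc) [] xs
    = List.foldl (fun acc x => PySem.List.insertBy
      (fun a b => decide (toLex (k1 a, k2 a) < toLex (k1 b, k2 b))) x acc) [] xs
  rw [hbefore]

theorem sorted2_eq_of_perm {α κ₁ κ₂ : Type} [LinearOrder κ₁] [LinearOrder κ₂]
    (xs ys : List α) (k1 : α → κ₁) (k2 : α → κ₂)
    (hp : ys.Perm xs)
    (hpw : ys.Pairwise (fun a b => k1 a < k1 b ∨ (k1 a = k1 b ∧ k2 a < k2 b))) :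
    PySem.List.sorted2 xs k1 k2 = ys := by
  rw [sorted2_eq_sorted_toLex]
  apply PySem.List.sorted_eq_of_perm_of_pairwise_lt _ _ _ hp
  exact hpw.imp (fun h => Prod.Lex.lt_iff.mpr h)

-- A's temp is S ++ rules.flatten
theorem foldl_app_eq (l : List String) (acc : List String) :
    l.foldl (fun acc symbol => acc ++ [symbol]) acc = acc ++ l := by
  induction l generalizing acc with
  | nil => simp
  | cons x t ih => simp [List.foldl_cons, ih]

theorem temp_eq (S : List String) (rules : List (List String)) :
    (rules.foldl (fun acc rule => rule.foldl (fun acc symbol => acc ++ [symbol]) acc)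
      (S.foldl (fun acc symbol => acc ++ [symbol]) [])) = S ++ rules.flatten := by
  rw [foldl_app_eq, List.nil_append]
  induction rules generalizing S with
  | nil => simp
  | cons r t ih =>
    rw [List.foldl_cons, foldl_app_eq, ih]
    simp [List.append_assoc]

-- B's set is set(S ++ rules.flatten)
theorem set_update_foldl (rules : List (List String)) (acc : List String) :
    rules.foldl (fun acc rule => PySem.Set.update acc rule) acc
      = (rules.flatten).foldl PySem.Set.add acc := by
  induction rules generalizing acc with
  | nil => rfl
  | cons r t ih =>
    rw [List.foldl_cons, ih, List.flatten_cons, List.foldl_append]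
    rfl

theorem alt_set_eq (S : List String) (rules : List (List String)) :
    rules.foldl (fun acc rule => PySem.Set.update acc rule) (PySem.Set.ofList S)
      = PySem.Set.ofList (S ++ rules.flatten) := by
  rw [set_update_foldl, PySem.Set.ofList_eq_foldl, PySem.Set.ofList_eq_foldl, List.foldl_append]

-- A's partition loop is a pair of filters
theorem partition_foldl (l : List String) (lo up : List String) :
    l.foldl (fun (lu : List String × List String) i =>
        if pyStrIslower i then (lu.1 ++ [i], lu.2) else (lu.1, lu.2 ++ [i])) (lo, up)
      = (lo ++ l.filter pyStrIslower, up ++ l.filter (fun i => !pyStrIslower i)) := by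
  induction l generalizing lo up with
  | nil => simp
  | cons x t ih =>
    by_cases h : pyStrIslower x
    · simp [List.foldl_cons, h, ih]
    · simp [List.foldl_cons, h, ih]

-- the core equality: symbolTable(temp) = sorted2 of set(temp)
theorem symbolTable_eq (temp : List String) :
    symbolTablePort temp
      = PySem.List.sorted2 (PySem.Set.ofList temp) (fun s => !pyStrIslower s) (fun s => s) := by
  unfold symbolTablePort
  simp only [partition_foldl, List.nil_append]
  set c := PySem.Set.ofList temp with hc
  have hnd : c.Nodup := PySem.Set.nodup_ofList temp
  have block : ∀ (p : String → Bool),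
      (PySem.List.sorted (c.filter p) (fun x : String => x)).Pairwise (· < ·) := by
    intro p
    have hle := PySem.List.sorted_pairwise (c.filter p) (fun x : String => x)
    have hnd' : (PySem.List.sorted (c.filter p) (fun x : String => x)).Nodup :=
      ((PySem.List.sorted_perm _ _ _).nodup_iff).mpr (hnd.filter _)
    refine (hle.and hnd').imp ?_
    rintro a b ⟨h1, h2⟩
    exact lt_of_le_of_ne h1 h2
  have memlo : ∀ a ∈ PySem.List.sorted (c.filter pyStrIslower) (fun x : String => x),
      pyStrIslower a = true := by
    intro a ha
    exact (List.mem_filter.mp ((PySem.List.mem_sorted _ _ _ _).mp ha)).2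
  have memup : ∀ a ∈ PySem.List.sorted (c.filter (fun i => !pyStrIslower i)) (fun x : String => x),
      pyStrIslower a = false := by
    intro a ha
    simpa using (List.mem_filter.mp ((PySem.List.mem_sorted _ _ _ _).mp ha)).2
  symm
  apply sorted2_eq_of_perm
  · exact ((PySem.List.sorted_perm _ _ _).append (PySem.List.sorted_perm _ _ _)).trans
      (by simpa using List.filter_append_perm pyStrIslower c)
  · apply List.pairwise_append.mpr
    refine ⟨?_, ?_, ?_⟩
    · refine (block pyStrIslower).imp_of_mem ?_
      intro a b ha hb h
      right
      exact ⟨by rw [memlo a ha, memlo b hb], h⟩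
    · refine (block (fun i => !pyStrIslower i)).imp_of_mem ?_
      intro a b ha hb h
      right
      exact ⟨by rw [memup a ha, memup b hb], h⟩
    · intro a ha b hb
      left
      rw [memlo a ha, memup b hb]
      decide

-- ===== VERDICT (by name: the statement is the Claim_ definition above) =====
theorem buildTableRepair_spec : Claim_equal_buildTableRepair := by
  intro S rules _
  show buildTableRepair S rules = buildTableRepair_alt S rules
  have h1 : buildTableRepair S rules = symbolTablePort (S ++ rules.flatten) :=
    congrArg symbolTablePort (temp_eq S rules)
  have h2 : buildTableRepair_alt S rules
      = PySem.List.sorted2 (PySem.Set.ofList (S ++ rules.flatten))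
          (fun s => !pyStrIslower s) (fun s => s) :=
    congrArg (fun t => PySem.List.sorted2 t (fun s => !pyStrIslower s) (fun s => s))
      (alt_set_eq S rules)
  exact h1.trans ((symbolTable_eq _).trans h2.symm)
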